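-- pv_equiv track=rewrite | github.com/RaggedR/rsk-transformer | rsk.py | _transpose_filling
-- ===== SOURCE A (Python) =====
-- Filling = list[list[int]]
--
-- def _transpose_filling(filling: Filling, shape: list[int]) -> list[list[int]]:
--     """Transpose a filling (rows → columns). Column j has entries from all rows containing column j."""
--     if not shape:
--         return []
--     cols = []
--     for j in range(shape[0]):
--         col = []
--         for r in range(len(filling)):
--             if j < len(filling[r]):
--                 col.append(filling[r][j])
--             else:
--                 break
--         cols.append(col)
--     return cols
-- ===== SOURCE B (Python) =====
-- def _transpose_filling(filling, shape):
--     if not shape: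
--         return []
--     cols = [[] for _ in range(shape[0])]
--     m = shape[0]
--     for row in filling:
--         m = min(m, len(row))
--         for j in range(m):
--             cols[j].append(row[j])
--     return cols
-- ===== Notes on version B (the rewrite author's own statement) =====
-- stated objective: faster
-- what changed: A builds each column with a fresh inner scan over the rows (column-major, re-indexing filling[r][j] per column); B makes a single row-major pass maintaining a running minimum m of row lengths that reproduces A's break semantics, appending each row's first m entries into preallocated columns.
import Mathlib
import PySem

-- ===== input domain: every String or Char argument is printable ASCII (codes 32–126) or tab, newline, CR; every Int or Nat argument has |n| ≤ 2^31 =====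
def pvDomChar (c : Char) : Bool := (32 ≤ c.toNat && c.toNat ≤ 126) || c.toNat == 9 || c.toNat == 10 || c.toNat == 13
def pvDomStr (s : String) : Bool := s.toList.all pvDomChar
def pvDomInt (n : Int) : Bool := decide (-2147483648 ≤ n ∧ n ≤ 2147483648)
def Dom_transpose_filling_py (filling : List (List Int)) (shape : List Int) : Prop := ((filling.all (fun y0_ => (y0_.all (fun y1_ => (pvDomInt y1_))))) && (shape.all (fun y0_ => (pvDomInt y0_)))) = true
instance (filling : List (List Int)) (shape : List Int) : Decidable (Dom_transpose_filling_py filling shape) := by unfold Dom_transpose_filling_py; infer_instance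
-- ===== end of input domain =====

-- B replaces A's column-major scans (one inner row scan with a break per column) by a single
-- row-major pass with a running minimum of row lengths, appending in place into the columns.

-- ===== PORT A =====
-- inner loop of A: 'for r in range(len(filling)): if j < len(filling[r]): col.append(filling[r][j]) else: break'
def pvColA (j : Int) : List (List Int) → List Int
  | [] => []
  | row :: rest =>
      if j < (row.length : Int) then PySem.List.pyGetD row j 0 :: pvColA j rest else []

def transpose_filling_py (filling : List (List Int)) (shape : List Int) : List (List Int) :=
  match shape with
  | [] => []
  | s0 :: _ => (PySem.List.pyRange 0 s0 1).map (fun j => pvColA j filling)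

-- ===== PORT B =====
-- the inner loop 'for j in range(m): cols[j].append(row[j])'; both indexings are in range in
-- Python (0 ≤ j < m ≤ len(cols), m ≤ len(row)), so getD/set render them exactly
def pvBRow (row : List Int) (m : Int) (cols : List (List Int)) : List (List Int) :=
  (PySem.List.pyRange 0 m 1).foldl
    (fun cs j => cs.set j.toNat (cs.getD j.toNat [] ++ [PySem.List.pyGetD row j 0])) cols

-- the 'for row in filling' loop carrying (cols, m)
def pvBLoop (rows : List (List Int)) (cols : List (List Int)) (m : Int) : List (List Int) :=
  match rows with
  | [] => cols
  | row :: rs => pvBLoop rs (pvBRow row (min m (row.length : Int)) cols) (min m (row.length : Int))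

def transpose_filling_py_alt (filling : List (List Int)) (shape : List Int) : List (List Int) :=
  match shape with
  | [] => []
  | s0 :: _ => pvBLoop filling ((PySem.List.pyRange 0 s0 1).map (fun _ => [])) s0

-- ===== PRECONDITION & SPEC =====
def Spec_transpose_filling_py (filling : List (List Int)) (shape : List Int) (out : List (List Int)) : Prop := out = transpose_filling_py_alt filling shape
instance (filling : List (List Int)) (shape : List Int) (out : List (List Int)) : Decidable (Spec_transpose_filling_py filling shape out) := by unfold Spec_transpose_filling_py; infer_instance

-- ===== CLAIM (what is proved, stated in full; the proofs are below) =====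
def Claim_equal_transpose_filling_py : Prop := ∀ (filling : List (List Int)) (shape : List Int), Dom_transpose_filling_py filling shape → Spec_transpose_filling_py filling shape (transpose_filling_py filling shape)

-- ===== LEMMAS AND PROOFS =====

-- B's column j as a function of the rows, with the running minimum m carried along
def pvColB (j : Nat) (m : Int) : List (List Int) → List Int
  | [] => []
  | row :: rs =>
      if (j : Int) < min m (row.length : Int)
      then row.getD j 0 :: pvColB j (min m (row.length : Int)) rs
      else []

-- structural form of one row-step: append row[k] to the k-th column when k < m
def pvBUpd (row : List Int) (m : Int) (j : Nat) : List (List Int) → List (List Int)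
  | [] => []
  | c :: cs => (if (j : Int) < m then c ++ [row.getD j 0] else c) :: pvBUpd row m (j + 1) cs

-- indexed 'append f j to the j-th list'
def pvMapiApp (f : Nat → List Int) (j : Nat) : List (List Int) → List (List Int)
  | [] => []
  | c :: cs => (c ++ f j) :: pvMapiApp f (j + 1) cs

theorem pvFold_get (row : List Int) (l : List Int) (cols : List (List Int)) (i : Nat)
    (hnd : l.Nodup) (hpos : ∀ x ∈ l, 0 ≤ x) :
    (l.foldl (fun cs j => cs.set j.toNat (cs.getD j.toNat [] ++ [PySem.List.pyGetD row j 0])) cols)[i]?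
      = if (i : Int) ∈ l then cols[i]?.map (fun c => c ++ [PySem.List.pyGetD row (i : Int) 0])
        else cols[i]? := by
  induction l generalizing cols with
  | nil => simp
  | cons j rest ih =>
      obtain ⟨hj, hrest⟩ := List.nodup_cons.mp hnd
      have hj0 : 0 ≤ j := hpos j (List.mem_cons_self ..)
      simp only [List.foldl_cons]
      rw [ih _ hrest (fun x hx => hpos x (List.mem_cons_of_mem _ hx))]
      by_cases hmem : (i : Int) ∈ rest
      · have hne : j.toNat ≠ i := by
          intro h; exact hj (by rwa [← h, Int.toNat_of_nonneg hj0] at hmem)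
        rw [if_pos hmem, if_pos (List.mem_cons_of_mem _ hmem), List.getElem?_set_ne hne]
      · by_cases hij : (i : Int) = j
        · have hji : j.toNat = i := by omega
          rw [if_neg hmem, if_pos (by simp [hij]), hji, ← hij]
          cases hc : cols[i]? with
          | none => simp [List.getElem?_set_self', hc]
          | some c =>
              simp [List.getElem?_set_self', hc, List.getD_eq_getElem?_getD]
        · have hne : j.toNat ≠ i := by
            intro h; exact hij (by rw [← h, Int.toNat_of_nonneg hj0])
          rw [if_neg hmem, if_neg (by simp [hij, hmem]), List.getElem?_set_ne hne]

theorem pvBUpd_get (row : List Int) (m : Int) (cols : List (List Int)) (j i : Nat) :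
    (pvBUpd row m j cols)[i]?
      = cols[i]?.map (fun c => if ((j + i : Nat) : Int) < m then c ++ [row.getD (j + i) 0] else c) := by
  induction cols generalizing j i with
  | nil => simp [pvBUpd]
  | cons c cs ih =>
      cases i with
      | zero => simp [pvBUpd]
      | succ i' =>
          simp only [pvBUpd, List.getElem?_cons_succ, ih]
          have : j + 1 + i' = j + (i' + 1) := by omega
          rw [this]

theorem pvBRow_eq_bUpd (row : List Int) (m : Int) (cols : List (List Int)) :
    pvBRow row m cols = pvBUpd row m 0 cols := by
  apply List.ext_getElem?
  intro i
  rw [pvBRow, pvFold_get row _ cols i (PySem.List.nodup_pyRange_one 0 m)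
        (fun x hx => (PySem.List.mem_pyRange_one.mp hx).1),
      pvBUpd_get]
  simp only [PySem.List.mem_pyRange_one, Nat.zero_add, PySem.List.pyGetD_natCast]
  by_cases h : (i : Int) < m
  · rw [if_pos ⟨by omega, h⟩]
    cases cols[i]? <;> simp [h]
  · rw [if_neg (by omega)]
    cases cols[i]? <;> simp [h]

theorem pvColB_nil (rows : List (List Int)) (j : Nat) (m : Int) (h : ¬ (j : Int) < m) :
    pvColB j m rows = [] := by
  cases rows with
  | nil => rfl
  | cons row rs =>
      simp only [pvColB]
      rw [if_neg]
      intro hlt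
      exact h (lt_of_lt_of_le hlt (min_le_left _ _))

theorem pvMapiApp_congr (f g : Nat → List Int) (cols : List (List Int)) (j : Nat)
    (h : ∀ k, f k = g k) : pvMapiApp f j cols = pvMapiApp g j cols := by
  induction cols generalizing j with
  | nil => rfl
  | cons c cs ih => simp only [pvMapiApp, h, ih]

theorem pvMapiApp_nilfun (cols : List (List Int)) (j : Nat) :
    pvMapiApp (fun _ => []) j cols = cols := by
  induction cols generalizing j with
  | nil => rfl
  | cons c cs ih => simp only [pvMapiApp, List.append_nil, ih]

theorem pvMapiApp_bUpd (row : List Int) (m : Int) (f : Nat → List Int)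
    (cols : List (List Int)) (j : Nat) :
    pvMapiApp f j (pvBUpd row m j cols)
      = pvMapiApp (fun k => (if (k : Int) < m then [row.getD k 0] else []) ++ f k) j cols := by
  induction cols generalizing j with
  | nil => rfl
  | cons c cs ih =>
      simp only [pvBUpd, pvMapiApp, ih]
      congr 1
      split_ifs <;> simp

theorem pvBLoop_eq (rows : List (List Int)) (m : Int) (cols : List (List Int)) :
    pvBLoop rows cols m = pvMapiApp (fun k => pvColB k m rows) 0 cols := by
  induction rows generalizing m cols with
  | nil => simp only [pvBLoop]; exact (pvMapiApp_nilfun cols 0).symm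
  | cons row rs ih =>
      simp only [pvBLoop]
      rw [pvBRow_eq_bUpd, ih, pvMapiApp_bUpd]
      apply pvMapiApp_congr
      intro k
      simp only [pvColB]
      split_ifs with h
      · simp
      · rw [pvColB_nil rs k _ h]; simp

theorem pvMapiApp_map_const {α : Type} (l : List α) (f : Nat → List Int) (j : Nat) :
    pvMapiApp f j (l.map fun _ => ([] : List Int))
      = (List.range l.length).map (fun k => f (j + k)) := by
  induction l generalizing j with
  | nil => rfl
  | cons a t ih =>
      simp only [List.map_cons, pvMapiApp, List.nil_append, ih, List.length_cons,
        List.range_succ_eq_map, List.map_cons, List.map_map, Nat.add_zero]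
      congr 1
      apply List.map_congr_left
      intro k _
      simp only [Function.comp]
      congr 1
      omega

theorem pvColA_eq_colB (rows : List (List Int)) (k : Nat) (m : Int) (h : (k : Int) < m) :
    pvColA (k : Int) rows = pvColB k m rows := by
  induction rows generalizing m with
  | nil => rfl
  | cons row rs ih =>
      simp only [pvColA, pvColB, lt_min_iff]
      by_cases hr : (k : Int) < (row.length : Int)
      · rw [if_pos hr, if_pos ⟨h, hr⟩, ih _ (lt_min_iff.mpr ⟨h, hr⟩)]
        congr 1
        rw [PySem.List.pyGetD_natCast]
      · rw [if_neg hr, if_neg (fun hh => hr hh.2)]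

-- ===== VERDICT (by name: the statement is the Claim_ definition above) =====
theorem transpose_filling_py_spec : Claim_equal_transpose_filling_py := by
  intro filling shape _
  unfold Spec_transpose_filling_py
  cases shape with
  | nil => rfl
  | cons s0 rest =>
      show (PySem.List.pyRange 0 s0 1).map (fun j => pvColA j filling)
            = pvBLoop filling ((PySem.List.pyRange 0 s0 1).map (fun _ => [])) s0
      rw [pvBLoop_eq, pvMapiApp_map_const, PySem.List.length_pyRange_one,
        PySem.List.pyRange_one]
      simp only [List.map_map, zero_add, Int.sub_zero]
      apply List.map_congr_left
      intro k hk
      simp only [Function.comp]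
      rw [pvColA_eq_colB]
      have : k < s0.toNat := List.mem_range.mp hk
      omega
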